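-- pv_equiv track=rewrite | github.com/btsp6/Advent-Of-Code-2023 | Day-13/incidence.py | get_reflection
-- ===== SOURCE A (Python) =====
-- def get_reflection(array):
--     """Finds the index after which the array is a reflection across that point."""
--     for reflection in range(0, len(array)-1):
--         idx = reflection
--         is_reflection = True
--         while idx >= 0 and (reflected_idx := 2*reflection+1 - idx) < len(array):
--             if array[idx] != array[reflected_idx]:
--                 is_reflection = False
--                 break
--             idx -= 1
--         if is_reflection:
--             return reflection + 1
--     return None
-- ===== SOURCE B (Python) =====
-- def get_reflection(array):
--     """Finds the index after which the array is a reflection across that point."""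
--     n = len(array)
--     for r in range(n - 1):
--         k = min(r + 1, n - (r + 1))
--         # cheap O(1) filters: the innermost pair and the boundary pair of the window must match
--         if array[r] != array[r + 1] or array[r + 1 - k] != array[r + k]:
--             continue
--         if array[r + 1 - k : r + 1] == array[r + 1 : r + 1 + k][::-1]:
--             return r + 1
--     return None
-- ===== Notes on version B (the rewrite author's own statement) =====
-- stated objective: alternative
-- what changed: The inner element-by-element while loop with a flag is replaced, per candidate axis, by two O(1) pair filters followed by one whole-window slice-vs-reversed-slice comparison.
import Mathlib
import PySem

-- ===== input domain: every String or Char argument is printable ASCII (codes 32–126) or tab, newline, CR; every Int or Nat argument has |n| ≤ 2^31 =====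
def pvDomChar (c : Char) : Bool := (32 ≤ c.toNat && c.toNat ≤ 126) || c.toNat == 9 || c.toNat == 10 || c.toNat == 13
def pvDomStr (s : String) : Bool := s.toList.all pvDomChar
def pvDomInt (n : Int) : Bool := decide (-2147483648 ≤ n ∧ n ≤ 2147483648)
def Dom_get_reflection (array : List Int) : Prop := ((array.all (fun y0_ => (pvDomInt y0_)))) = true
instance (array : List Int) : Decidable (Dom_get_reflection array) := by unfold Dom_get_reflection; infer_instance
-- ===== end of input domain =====

-- B replaces A's inner while loop and flag by two O(1) pair filters plus one slice-vs-reversed-slice comparison per axis (alternative; same asymptotic cost).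

-- ===== PORT A =====
-- the inner 'while idx >= 0 and (reflected_idx := 2*reflection+1 - idx) < len(array)' loop,
-- idx counting down from reflection; the 'idx = 0' arm is the exit via 'idx >= 0' failing
def pvAInner (a : List Int) (r : Nat) (idx : Nat) : Bool :=
  if 2*r+1-idx < a.length then
    if PySem.List.pyGet? a (idx : Int) == PySem.List.pyGet? a ((2*r+1-idx : Nat) : Int) then
      match idx with
      | 0 => true
      | i+1 => pvAInner a r i
    else false
  else true
termination_by idx

-- 'for reflection in range(0, len(array)-1)' with early return
def pvAScan (a : List Int) : List Nat → Option Int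
  | [] => none
  | r :: rs => if pvAInner a r r then some ((r : Int) + 1) else pvAScan a rs

def get_reflection (array : List Int) : Option Int :=
  pvAScan array (List.range (array.length - 1))

-- ===== PORT B =====
def pvBCheck (a : List Int) (r : Nat) : Bool :=
  let n := a.length
  let k := min (r+1) (n - (r+1))
  -- 'if array[r] != array[r + 1] or array[r + 1 - k] != array[r + k]: continue'
  if (PySem.List.pyGet? a ((r : Nat) : Int) == PySem.List.pyGet? a ((r+1 : Nat) : Int))
      && (PySem.List.pyGet? a ((r+1-k : Nat) : Int) == PySem.List.pyGet? a ((r+k : Nat) : Int)) then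
    PySem.List.slice a (some ((r+1-k : Nat) : Int)) (some ((r+1 : Nat) : Int))
      == (PySem.List.slice a (some ((r+1 : Nat) : Int)) (some ((r+1+k : Nat) : Int))).reverse
  else false

def pvBScan (a : List Int) : List Nat → Option Int
  | [] => none
  | r :: rs => if pvBCheck a r then some ((r : Int) + 1) else pvBScan a rs

def get_reflection_alt (array : List Int) : Option Int :=
  pvBScan array (List.range (array.length - 1))

-- ===== PRECONDITION & SPEC =====
def Spec_get_reflection (array : List Int) (out : Option Int) : Prop := out = get_reflection_alt array
instance (array : List Int) (out : Option Int) : Decidable (Spec_get_reflection array out) := by unfold Spec_get_reflection; infer_instance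

-- ===== CLAIM (what is proved, stated in full; the proofs are below) =====
def Claim_equal_get_reflection : Prop := ∀ (array : List Int), Dom_get_reflection array → Spec_get_reflection array (get_reflection array)

-- ===== LEMMAS AND PROOFS =====

-- A's inner loop checks every pair (j, 2r+1-j) for j from idx down, stopping once the mirror leaves the array
theorem pvAInner_iff (a : List Int) (r : Nat) (idx : Nat) :
    pvAInner a r idx = true ↔ ∀ j ≤ idx, 2*r+1-j < a.length → a[j]? = a[2*r+1-j]? := by
  induction idx with
  | zero =>
    unfold pvAInner
    simp only [PySem.List.pyGet?_natCast]
    split_ifs with h₁ h₂ <;> simp_all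
  | succ i ih =>
    unfold pvAInner
    simp only [PySem.List.pyGet?_natCast]
    simp only [beq_iff_eq]
    split_ifs with h₁ h₂
    · simp only [ih]
      constructor
      · intro hall j hj hlt
        rcases Nat.lt_or_ge j (i+1) with hj' | hj'
        · exact hall j (by omega) hlt
        · have : j = i + 1 := by omega
          subst this; exact h₂
      · intro hall j hj hlt; exact hall j (by omega) hlt
    · simp only [false_iff]
      intro hall
      exact h₂ (hall (i+1) le_rfl h₁)
    · simp only [true_iff]
      intro j hj hlt
      exfalso; omega

theorem pvBCheck_iff (a : List Int) (r : Nat) (hr : r + 1 < a.length) :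
    pvBCheck a r = true ↔
      ∀ t < min (r+1) (a.length - (r+1)), a[r-t]? = a[r+1+t]? := by
  simp only [pvBCheck, PySem.List.pyGet?_natCast]
  set n := a.length with hn
  set k := min (r+1) (n - (r+1)) with hk
  have hk1 : k ≤ r + 1 := Nat.min_le_left _ _
  have hk2 : k ≤ n - (r+1) := Nat.min_le_right _ _
  have hkpos : 1 ≤ k := by omega
  split_ifs with hg
  · -- both cheap filters passed: the check is the slice comparison
    rw [PySem.List.slice_natCast, PySem.List.slice_natCast]
    have e1 : r + 1 - (r + 1 - k) = k := by omega
    have e2 : r + 1 + k - (r + 1) = k := by omega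
    rw [e1, e2]
    have hlenL : ((a.drop (r+1-k)).take k).length = k := by
      simp [List.length_take, List.length_drop]; omega
    have hlenR : ((a.drop (r+1)).take k).length = k := by
      simp [List.length_take, List.length_drop]; omega
    rw [beq_iff_eq]
    constructor
    · intro heq t ht
      have h1 : ((a.drop (r+1-k)).take k)[k-1-t]? = (((a.drop (r+1)).take k).reverse)[k-1-t]? := by
        rw [heq]
      rw [List.getElem?_reverse (by rw [hlenR]; omega), hlenR] at h1
      rw [List.getElem?_take_of_lt (by omega), List.getElem?_drop,
          List.getElem?_take_of_lt (by omega), List.getElem?_drop] at h1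
      have e3 : r + 1 - k + (k - 1 - t) = r - t := by omega
      have e4 : r + 1 + (k - 1 - (k - 1 - t)) = r + 1 + t := by omega
      rwa [e3, e4] at h1
    · intro hall
      apply List.ext_getElem?
      intro t
      rcases Nat.lt_or_ge t k with ht | ht
      · rw [List.getElem?_reverse (by rw [hlenR]; omega), hlenR]
        rw [List.getElem?_take_of_lt (by omega), List.getElem?_drop,
            List.getElem?_take_of_lt (by omega), List.getElem?_drop]
        have e3 : r + 1 - k + t = r - (k - 1 - t) := by omega
        rw [e3]
        exact hall (k-1-t) (by omega)
      · rw [List.getElem?_eq_none (by omega), List.getElem?_eq_none (by simp [List.length_reverse]; omega)]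
  · -- a cheap filter failed: the pair t = 0 or the pair t = k-1 mismatches
    simp only [Bool.false_eq_true, false_iff]
    intro hall
    apply hg
    simp only [Bool.and_eq_true, beq_iff_eq]
    refine ⟨hall 0 (by omega), ?_⟩
    have h2 := hall (k-1) (by omega)
    rwa [show r - (k-1) = r+1-k from by omega, show r+1+(k-1) = r+k from by omega] at h2

theorem check_eq (a : List Int) (r : Nat) (hr : r + 1 < a.length) :
    pvAInner a r r = pvBCheck a r := by
  have hA := pvAInner_iff a r r
  have hB := pvBCheck_iff a r hr
  set n := a.length with hn
  set k := min (r+1) (n - (r+1)) with hk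
  have : (∀ j ≤ r, 2*r+1-j < n → a[j]? = a[2*r+1-j]?) ↔
         (∀ t < k, a[r-t]? = a[r+1+t]?) := by
    constructor
    · intro h t ht
      have h1 : r - t ≤ r := by omega
      have h2 : 2*r+1-(r-t) < n := by omega
      have h3 : 2*r+1-(r-t) = r+1+t := by omega
      have := h (r-t) h1 h2
      rwa [h3] at this
    · intro h j hj hlt
      have ht : r - j < k := by omega
      have := h (r-j) ht
      have e1 : r - (r - j) = j := by omega
      have e2 : r + 1 + (r - j) = 2*r+1-j := by omega
      rwa [e1, e2] at this
  rw [Bool.eq_iff_iff]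
  rw [hA, hB, this]

theorem scan_eq (a : List Int) (rs : List Nat) (h : ∀ r ∈ rs, r + 1 < a.length) :
    pvAScan a rs = pvBScan a rs := by
  induction rs with
  | nil => rfl
  | cons r rs ih =>
    unfold pvAScan pvBScan
    rw [check_eq a r (h r (by simp))]
    exact if_congr Iff.rfl rfl (ih (fun x hx => h x (by simp [hx])))

-- ===== VERDICT (by name: the statement is the Claim_ definition above) =====
theorem get_reflection_spec : Claim_equal_get_reflection := by
  intro array _
  unfold Spec_get_reflection get_reflection get_reflection_alt
  exact scan_eq array _ (fun r hr => by
    have := List.mem_range.mp hr; omega)
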